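-- pv_equiv track=rewrite | github.com/ssuntoso/Picki-UBS-Challenge | routes/railwayBuilder.py | total_combination
-- ===== SOURCE A (Python) =====
-- def total_combination(total, component_count, nums, memo=None, i=0):
--     if memo is None:
--         memo = {}
--     if (total, component_count, i) in memo:
--         return memo[(total, component_count, i)]
--     if total == 0 and component_count == 0:
--         return 1
--     elif total < 0 or component_count < 0 or i == len(nums):
--         return 0
--     else:
--         memo[(total, component_count, i)] = total_combination(total - nums[i], component_count - 1, nums, memo, i + 1) \
--                                              + total_combination(total, component_count, nums, memo, i + 1)
--         return memo[(total, component_count, i)]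
-- ===== SOURCE B (Python) =====
-- # Iterative bottom-up DP (forward reachability + backward tabulation) instead of
-- # A's memoized recursion.  Equivalence is about the RETURN value only: A writes
-- # results into a caller-supplied memo dict, B never mutates it.
-- def total_combination(total, component_count, nums, memo=None, i=0):
--     if memo is None:
--         memo = {}
--     n = len(nums)
--     if (total, component_count, i) in memo:
--         return memo[(total, component_count, i)]
--     if total == 0 and component_count == 0:
--         return 1
--     if total < 0 or component_count < 0 or i >= n:
--         return 0
--
--     def leaf(t, c, j):
--         # value of state (t, c) at level j if it is a leaf, else None
--         if (t, c, j) in memo: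
--             return memo[(t, c, j)]
--         if t == 0 and c == 0:
--             return 1
--         if t < 0 or c < 0 or j == n:
--             return 0
--         return None
--
--     # forward pass: the set of states whose value is needed at each level i..n
--     levels = []
--     cur = {(total, component_count)}
--     j = i
--     while j < n:
--         levels.append(cur)
--         nxt = set()
--         for (t, c) in cur:
--             if leaf(t, c, j) is None:
--                 nxt.add((t - nums[j], c - 1))
--                 nxt.add((t, c))
--         cur = nxt
--         j += 1
--     levels.append(cur)
--
--     # backward pass: tabulate values from level n down to level i
--     vals = {}
--     j = n
--     for lvl in reversed(levels):
--         new = {}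
--         for (t, c) in lvl:
--             v = leaf(t, c, j)
--             if v is None:
--                 v = vals.get((t - nums[j], c - 1), 0) + vals.get((t, c), 0)
--             new[(t, c)] = v
--         vals = new
--         j -= 1
--     return vals.get((total, component_count), 0)
-- ===== Notes on version B (the rewrite author's own statement) =====
-- stated objective: alternative
-- what changed: A's top-down memoized recursion (which threads and mutates a memo dict through recursive calls) is replaced by an explicit iterative bottom-up DP: a forward pass computes the set of reachable (remaining_total, remaining_count) states per suffix level, then a backward pass tabulates each level's values from level len(nums) down to i; caller-supplied memo entries are honoured as leaves at every level, and B never mutates the memo.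
import Mathlib
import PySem

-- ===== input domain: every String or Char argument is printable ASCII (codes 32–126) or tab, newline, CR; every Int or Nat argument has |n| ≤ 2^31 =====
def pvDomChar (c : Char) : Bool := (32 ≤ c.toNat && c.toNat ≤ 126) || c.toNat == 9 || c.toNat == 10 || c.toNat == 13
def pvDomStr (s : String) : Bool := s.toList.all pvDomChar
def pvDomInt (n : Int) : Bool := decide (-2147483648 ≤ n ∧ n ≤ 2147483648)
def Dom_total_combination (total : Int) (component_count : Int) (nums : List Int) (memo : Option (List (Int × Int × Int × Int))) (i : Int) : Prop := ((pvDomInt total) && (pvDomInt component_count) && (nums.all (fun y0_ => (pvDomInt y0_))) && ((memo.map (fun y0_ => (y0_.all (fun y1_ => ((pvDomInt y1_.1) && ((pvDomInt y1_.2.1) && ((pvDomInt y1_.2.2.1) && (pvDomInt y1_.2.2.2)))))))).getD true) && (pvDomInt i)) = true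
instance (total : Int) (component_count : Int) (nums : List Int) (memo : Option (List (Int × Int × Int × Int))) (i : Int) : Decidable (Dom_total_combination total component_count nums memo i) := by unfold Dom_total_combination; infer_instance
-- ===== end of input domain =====

-- B replaces A's memoized recursion by an iterative bottom-up DP (forward reachability + backward
-- tabulation); equivalence is about the RETURN value only: A writes results into a caller-supplied
-- memo dict, B never mutates its arguments.

-- The Python memo dict (assoc-list parameter) as a PySem.Dict, shared entry conversion of both ports.
def pvMemoDict (memo : Option (List (Int × Int × Int × Int))) : PySem.Dict (Int × Int × Int) Int :=
  (memo.getD []).foldl (fun d e => d.insert (e.1, e.2.1, e.2.2.1) e.2.2.2) PySem.Dict.empty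

-- needed by the ports' termination proofs
theorem pvGetSomeLt {α : Type} (xs : List α) (i : Int) (x : α)
    (h : PySem.List.pyGet? xs i = some x) : i < (xs.length : Int) := by
  unfold PySem.List.pyGet? PySem.List.pyIdx? at h
  split_ifs at h <;> simp_all [List.getElem?_eq_some_iff] <;> omega

-- ===== PORT A =====
-- A's recursion, with the mutated memo dict threaded through explicitly (Python mutates it in place).
def pvGoA (nums : List Int) (t c i : Int) (m : PySem.Dict (Int × Int × Int) Int) :
    Int × PySem.Dict (Int × Int × Int) Int :=
  match m.get? (t, c, i) with
  | some v => (v, m)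
  | none =>
    if t = 0 ∧ c = 0 then (1, m)
    else if t < 0 ∨ c < 0 ∨ i = (nums.length : Int) then (0, m)
    else
      match hx : PySem.List.pyGet? nums i with
      | none => (0, m)   -- nums[i] raises IndexError in Python; Pre_ excludes reaching this
      | some x =>
        match pvGoA nums (t - x) (c - 1) (i + 1) m with
        | (r1, m1) =>
          match pvGoA nums t c (i + 1) m1 with
          | (r2, m2) => (r1 + r2, m2.insert (t, c, i) (r1 + r2))
termination_by ((nums.length : Int) - i).toNat
decreasing_by all_goals (have := pvGetSomeLt nums i _ hx; omega)

def total_combination (total : Int) (component_count : Int) (nums : List Int) (memo : Option (List (Int × Int × Int × Int))) (i : Int) : Int :=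
  (pvGoA nums total component_count i (pvMemoDict memo)).1

-- ===== PORT B =====
-- Source B's `leaf`: value of state (t, c) at level j if it is a leaf, else none
def pvLeaf (md : PySem.Dict (Int × Int × Int) Int) (n t c j : Int) : Option Int :=
  match md.get? (t, c, j) with
  | some v => some v
  | none =>
    if t = 0 ∧ c = 0 then some 1
    else if t < 0 ∨ c < 0 ∨ j = n then some 0
    else none

-- Source B's forward loop body: successors of the non-leaf states of `cur`
def pvExpand (md : PySem.Dict (Int × Int × Int) Int) (nums : List Int) (n : Int)
    (cur : PySem.Set (Int × Int)) (j : Int) : PySem.Set (Int × Int) :=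
  cur.foldl (fun s p =>
    if pvLeaf md n p.1 p.2 j = none then
      -- nums[j]: in-range whenever this branch is reached under Pre_ (getD 0 is the IndexError slot)
      PySem.Set.add (PySem.Set.add s (p.1 - (PySem.List.pyGet? nums j).getD 0, p.2 - 1)) (p.1, p.2)
    else s) PySem.Set.empty

-- Source B's forward while-loop: the list of per-level state sets, levels i..n
def pvFwd (md : PySem.Dict (Int × Int × Int) Int) (nums : List Int) (n : Int)
    (levels : List (PySem.Set (Int × Int))) (cur : PySem.Set (Int × Int)) (j : Int) :
    List (PySem.Set (Int × Int)) :=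
  if _h : j < n then pvFwd md nums n (levels ++ [cur]) (pvExpand md nums n cur j) (j + 1)
  else levels ++ [cur]
termination_by (n - j).toNat
decreasing_by omega

-- Source B's per-state value in the backward pass
def pvVal (md : PySem.Dict (Int × Int × Int) Int) (nums : List Int) (n : Int)
    (vals : PySem.Dict (Int × Int) Int) (j : Int) (p : Int × Int) : Int :=
  match pvLeaf md n p.1 p.2 j with
  | some v => v
  | none => vals.getD (p.1 - (PySem.List.pyGet? nums j).getD 0, p.2 - 1) 0 + vals.getD (p.1, p.2) 0

-- Source B's inner backward loop: tabulate one level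
def pvProcess (md : PySem.Dict (Int × Int × Int) Int) (nums : List Int) (n : Int)
    (vals : PySem.Dict (Int × Int) Int) (j : Int) (lvl : List (Int × Int)) :
    PySem.Dict (Int × Int) Int :=
  lvl.foldl (fun new p => new.insert p (pvVal md nums n vals j p)) PySem.Dict.empty

-- Source B's outer backward loop over reversed(levels), j counting down from n
def pvBwd (md : PySem.Dict (Int × Int × Int) Int) (nums : List Int) (n : Int)
    (vals : PySem.Dict (Int × Int) Int) (j : Int) (lvls : List (PySem.Set (Int × Int))) :
    PySem.Dict (Int × Int) Int :=
  match lvls with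
  | [] => vals
  | lvl :: rest => pvBwd md nums n (pvProcess md nums n vals j lvl) (j - 1) rest

def total_combination_alt (total : Int) (component_count : Int) (nums : List Int) (memo : Option (List (Int × Int × Int × Int))) (i : Int) : Int :=
  let md := pvMemoDict memo
  let n : Int := nums.length
  match md.get? (total, component_count, i) with
  | some v => v
  | none =>
    if total = 0 ∧ component_count = 0 then 1
    else if total < 0 ∨ component_count < 0 ∨ n ≤ i then 0
    else
      let lvls := pvFwd md nums n [] (PySem.Set.add PySem.Set.empty (total, component_count)) i
      (pvBwd md nums n PySem.Dict.empty n lvls.reverse).getD (total, component_count) 0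

-- ===== PRECONDITION & SPEC =====
-- Pre_ holds exactly where the Python A returns normally: a start index i outside [-len(nums), len(nums)]
-- makes A raise IndexError at nums[i] unless one of A's top-level short-circuits (memo hit, base cases)
-- fires first; those short-circuit inputs are kept by the remaining disjuncts.
def Pre_total_combination (total : Int) (component_count : Int) (nums : List Int) (memo : Option (List (Int × Int × Int × Int))) (i : Int) : Prop :=
  (-(nums.length : Int) ≤ i ∧ i ≤ (nums.length : Int)) ∨ total < 0 ∨ component_count < 0 ∨
    (total = 0 ∧ component_count = 0) ∨ (∃ e ∈ memo.getD [], (e.1, e.2.1, e.2.2.1) = (total, component_count, i))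
instance (total : Int) (component_count : Int) (nums : List Int) (memo : Option (List (Int × Int × Int × Int))) (i : Int) : Decidable (Pre_total_combination total component_count nums memo i) := by unfold Pre_total_combination; infer_instance

def pvWitness_total_combination : Int × Int × List Int × (Option (List (Int × Int × Int × Int))) × Int := (3, 2, [1, 2, 3], none, 0)

def Spec_total_combination (total : Int) (component_count : Int) (nums : List Int) (memo : Option (List (Int × Int × Int × Int))) (i : Int) (out : Int) : Prop := out = total_combination_alt total component_count nums memo i
instance (total : Int) (component_count : Int) (nums : List Int) (memo : Option (List (Int × Int × Int × Int))) (i : Int) (out : Int) : Decidable (Spec_total_combination total component_count nums memo i out) := by unfold Spec_total_combination; infer_instance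

-- ===== CLAIM (what is proved, stated in full; the proofs are below) =====
def Claim_equal_total_combination : Prop := ∀ (total : Int) (component_count : Int) (nums : List Int) (memo : Option (List (Int × Int × Int × Int))) (i : Int), Dom_total_combination total component_count nums memo i → Pre_total_combination total component_count nums memo i → Spec_total_combination total component_count nums memo i (total_combination total component_count nums memo i)

-- ===== LEMMAS AND PROOFS =====
theorem pvGetSome {α : Type} (xs : List α) (i : Int) (h : -(xs.length : Int) ≤ i)
    (h2 : i < (xs.length : Int)) : ∃ x, PySem.List.pyGet? xs i = some x := by
  unfold PySem.List.pyGet? PySem.List.pyIdx?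
  split_ifs with h0
  all_goals simp [List.getElem?_eq_some_iff]
  case _ => omega
  case _ => omega

theorem pvGetNoneOfGe {α : Type} (xs : List α) (i : Int) (h2 : (xs.length : Int) ≤ i) :
    PySem.List.pyGet? xs i = none := by
  unfold PySem.List.pyGet? PySem.List.pyIdx?
  split_ifs <;> simp_all <;> omega

-- the memo-consulting recursion both programs compute (reference function, proofs only)
def pvG (md : PySem.Dict (Int × Int × Int) Int) (nums : List Int) (t c i : Int) : Int :=
  match md.get? (t, c, i) with
  | some v => v
  | none =>
    if t = 0 ∧ c = 0 then 1
    else if t < 0 ∨ c < 0 ∨ i = (nums.length : Int) then 0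
    else
      match hx : PySem.List.pyGet? nums i with
      | none => 0
      | some x => pvG md nums (t - x) (c - 1) (i + 1) + pvG md nums t c (i + 1)
termination_by ((nums.length : Int) - i).toNat
decreasing_by all_goals (have := pvGetSomeLt nums i _ hx; omega)

theorem pvG_memo {md : PySem.Dict (Int × Int × Int) Int} {nums : List Int} {t c i v : Int}
    (h : md.get? (t, c, i) = some v) : pvG md nums t c i = v := by
  rw [pvG, h]

theorem pvG_base1 {md : PySem.Dict (Int × Int × Int) Int} {nums : List Int} {t c i : Int}
    (h : md.get? (t, c, i) = none) (hb : t = 0 ∧ c = 0) : pvG md nums t c i = 1 := by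
  rw [pvG, h]; simp [hb]

theorem pvG_base0 {md : PySem.Dict (Int × Int × Int) Int} {nums : List Int} {t c i : Int}
    (h : md.get? (t, c, i) = none) (hnb : ¬(t = 0 ∧ c = 0))
    (h0 : t < 0 ∨ c < 0 ∨ i = (nums.length : Int)) : pvG md nums t c i = 0 := by
  rw [pvG, h]; simp [hnb, h0]

theorem pvG_zero_of_ge {md : PySem.Dict (Int × Int × Int) Int} {nums : List Int} {t c i : Int}
    (h : md.get? (t, c, i) = none) (hnb : ¬(t = 0 ∧ c = 0))
    (hnn : ¬(t < 0 ∨ c < 0 ∨ i = (nums.length : Int))) (hge : (nums.length : Int) ≤ i) :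
    pvG md nums t c i = 0 := by
  rw [pvG, h]; simp only [if_neg hnb, if_neg hnn]
  rw [pvGetNoneOfGe nums i hge]

theorem pvG_rec {md : PySem.Dict (Int × Int × Int) Int} {nums : List Int} {t c i x : Int}
    (h : md.get? (t, c, i) = none) (hnb : ¬(t = 0 ∧ c = 0))
    (hnn : ¬(t < 0 ∨ c < 0 ∨ i = (nums.length : Int))) (hx : PySem.List.pyGet? nums i = some x) :
    pvG md nums t c i = pvG md nums (t - x) (c - 1) (i + 1) + pvG md nums t c (i + 1) := by
  rw [pvG, h]; simp only [if_neg hnb, if_neg hnn]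
  split
  · simp_all
  · rename_i x' hx'; rw [hx'] at hx; injection hx with hxx; rw [hxx]

-- ===== A-side: the threaded memo stays a sound extension of the initial memo =====
def pvInv (md : PySem.Dict (Int × Int × Int) Int) (nums : List Int)
    (m : PySem.Dict (Int × Int × Int) Int) : Prop :=
  ∀ k : Int × Int × Int, m.get? k = md.get? k ∨
    (md.get? k = none ∧ m.get? k = some (pvG md nums k.1 k.2.1 k.2.2))

theorem pvGoA_g (md : PySem.Dict (Int × Int × Int) Int) (nums : List Int) (t c i : Int)
    (m : PySem.Dict (Int × Int × Int) Int) :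
    pvInv md nums m →
      (pvGoA nums t c i m).1 = pvG md nums t c i ∧ pvInv md nums (pvGoA nums t c i m).2 := by
  fun_induction pvGoA nums t c i m with
  | case1 t c i m v hm =>
    intro hInv
    refine ⟨?_, hInv⟩
    rcases hInv (t, c, i) with h | ⟨h1, h2⟩
    · rw [hm] at h
      exact (pvG_memo h.symm).symm
    · rw [hm] at h2
      exact Option.some_injective _ h2
  | case2 t c i m hm hb =>
    intro hInv
    refine ⟨?_, hInv⟩
    rcases hInv (t, c, i) with h | ⟨h1, h2⟩
    · rw [hm] at h
      exact (pvG_base1 h.symm hb).symm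
    · simp [hm] at h2
  | case3 t c i m hm hnb h0 =>
    intro hInv
    refine ⟨?_, hInv⟩
    rcases hInv (t, c, i) with h | ⟨h1, h2⟩
    · rw [hm] at h
      exact (pvG_base0 h.symm hnb h0).symm
    · simp [hm] at h2
  | case4 t c i m hm hnb h0 hx =>
    intro hInv
    refine ⟨?_, hInv⟩
    rcases hInv (t, c, i) with h | ⟨h1, h2⟩
    · rw [hm] at h
      have hmd : md.get? (t, c, i) = none := h.symm
      rw [pvG, hmd]
      simp only [if_neg hnb, if_neg h0]
      split
      · rfl
      · rename_i x' hx'; rw [hx'] at hx; cases hx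
    · simp [hm] at h2
  | case5 t c i m hm hnb h0 x hx r1 m1 hp r2 m2 hq ih1 ih2 =>
    intro hInv
    have hmd : md.get? (t, c, i) = none := by
      rcases hInv (t, c, i) with h | ⟨h1, h2⟩
      · rw [hm] at h; exact h.symm
      · exact h1
    have H1 := ih1 hInv
    rw [hp] at H1
    have H2 := ih2 H1.2
    rw [hq] at H2
    have e1 : r1 = pvG md nums (t - x) (c - 1) (i + 1) := H1.1
    have e2 : r2 = pvG md nums t c (i + 1) := H2.1
    constructor
    · show r1 + r2 = pvG md nums t c i
      rw [e1, e2, pvG_rec hmd hnb h0 hx]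
    · intro k
      by_cases hk : k = (t, c, i)
      · subst hk
        right
        refine ⟨hmd, ?_⟩
        show (m2.insert (t, c, i) (r1 + r2)).get? (t, c, i) = some (pvG md nums t c i)
        rw [PySem.Dict.get?_insert, if_pos rfl, e1, e2, pvG_rec hmd hnb h0 hx]
      · have hk2 := H2.2 k
        show (m2.insert (t, c, i) (r1 + r2)).get? k = _ ∨ _
        rw [PySem.Dict.get?_insert, if_neg hk]
        exact hk2

theorem pvA_eq_g (total component_count : Int) (nums : List Int)
    (memo : Option (List (Int × Int × Int × Int))) (i : Int) :
    total_combination total component_count nums memo i =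
      pvG (pvMemoDict memo) nums total component_count i := by
  have h := pvGoA_g (pvMemoDict memo) nums total component_count i (pvMemoDict memo)
    (fun _ => Or.inl rfl)
  exact h.1

-- ===== B-side =====
theorem pvLeaf_some_g {md : PySem.Dict (Int × Int × Int) Int} {nums : List Int} {n t c j v : Int}
    (hn : n = (nums.length : Int)) (h : pvLeaf md n t c j = some v) : pvG md nums t c j = v := by
  subst hn
  unfold pvLeaf at h
  rcases hmd : md.get? (t, c, j) with _ | w <;> rw [hmd] at h
  · split_ifs at h with h1 h2 <;> injection h with h
    · rw [pvG_base1 hmd h1, h]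
    · rw [pvG_base0 hmd h1 h2, h]
  · injection h with h
    rw [pvG_memo hmd, h]

theorem pvLeaf_none_elim {md : PySem.Dict (Int × Int × Int) Int} {n t c j : Int}
    (h : pvLeaf md n t c j = none) :
    md.get? (t, c, j) = none ∧ ¬(t = 0 ∧ c = 0) ∧ ¬(t < 0 ∨ c < 0 ∨ j = n) := by
  unfold pvLeaf at h
  rcases hmd : md.get? (t, c, j) with _ | w <;> rw [hmd] at h
  · split_ifs at h with h1 h2
    exact ⟨rfl, h1, h2⟩
  · exact absurd h (by simp)

theorem pvLeaf_at_n {md : PySem.Dict (Int × Int × Int) Int} {n t c : Int} :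
    pvLeaf md n t c n ≠ none := by
  intro h
  have := pvLeaf_none_elim h
  exact this.2.2 (Or.inr (Or.inr rfl))

-- membership facts for pvExpand
theorem pvExpand_mono (md : PySem.Dict (Int × Int × Int) Int) (nums : List Int) (n j : Int)
    (l : List (Int × Int)) (acc : PySem.Set (Int × Int)) (q : Int × Int) (hq : q ∈ acc) :
    q ∈ l.foldl (fun s p =>
      if pvLeaf md n p.1 p.2 j = none then
        PySem.Set.add (PySem.Set.add s (p.1 - (PySem.List.pyGet? nums j).getD 0, p.2 - 1)) (p.1, p.2)
      else s) acc := by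
  induction l generalizing acc with
  | nil => exact hq
  | cons a l ih =>
    simp only [List.foldl_cons]
    apply ih
    split
    · exact (PySem.Set.mem_add _ _ _).mpr (Or.inl ((PySem.Set.mem_add _ _ _).mpr (Or.inl hq)))
    · exact hq

theorem pvMem_expand_aux (md : PySem.Dict (Int × Int × Int) Int) (nums : List Int) (n j : Int) :
    ∀ (l : List (Int × Int)) (acc : PySem.Set (Int × Int)) (p : Int × Int), p ∈ l →
      pvLeaf md n p.1 p.2 j = none →
      (p.1 - (PySem.List.pyGet? nums j).getD 0, p.2 - 1) ∈ l.foldl (fun s p =>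
        if pvLeaf md n p.1 p.2 j = none then
          PySem.Set.add (PySem.Set.add s (p.1 - (PySem.List.pyGet? nums j).getD 0, p.2 - 1)) (p.1, p.2)
        else s) acc ∧
      p ∈ l.foldl (fun s p =>
        if pvLeaf md n p.1 p.2 j = none then
          PySem.Set.add (PySem.Set.add s (p.1 - (PySem.List.pyGet? nums j).getD 0, p.2 - 1)) (p.1, p.2)
        else s) acc := by
  intro l
  induction l with
  | nil => intro acc p hp; cases hp
  | cons a l ih =>
    intro acc p hp hl
    rcases List.mem_cons.mp hp with rfl | hp'
    · simp only [List.foldl_cons, if_pos hl]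
      constructor
      · exact pvExpand_mono md nums n j l _ _
          ((PySem.Set.mem_add _ _ _).mpr (Or.inl ((PySem.Set.mem_add _ _ _).mpr (Or.inr rfl))))
      · exact pvExpand_mono md nums n j l _ _
          ((PySem.Set.mem_add _ _ _).mpr (Or.inr rfl))
    · simp only [List.foldl_cons]
      exact ih _ p hp' hl

theorem pvMem_expand (md : PySem.Dict (Int × Int × Int) Int) (nums : List Int) (n j : Int)
    (cur : PySem.Set (Int × Int)) (p : Int × Int) (hp : p ∈ cur)
    (hl : pvLeaf md n p.1 p.2 j = none) :
    (p.1 - (PySem.List.pyGet? nums j).getD 0, p.2 - 1) ∈ pvExpand md nums n cur j ∧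
      p ∈ pvExpand md nums n cur j := by
  exact pvMem_expand_aux md nums n j cur PySem.Set.empty p hp hl

theorem pvExpand_at_n (md : PySem.Dict (Int × Int × Int) Int) (nums : List Int) (n : Int)
    (cur : PySem.Set (Int × Int)) (q : Int × Int) (hq : q ∈ pvExpand md nums n cur n) : False := by
  unfold pvExpand at hq
  have aux : ∀ (l : List (Int × Int)) (acc : PySem.Set (Int × Int)),
      l.foldl (fun s p =>
        if pvLeaf md n p.1 p.2 n = none then
          PySem.Set.add (PySem.Set.add s (p.1 - (PySem.List.pyGet? nums n).getD 0, p.2 - 1)) (p.1, p.2)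
        else s) acc = acc := by
    intro l
    induction l with
    | nil => intro acc; rfl
    | cons a l ih =>
      intro acc
      rw [List.foldl_cons]
      rw [if_neg pvLeaf_at_n]
      exact ih acc
  rw [aux] at hq
  cases hq

theorem pvProcess_get? (md : PySem.Dict (Int × Int × Int) Int) (nums : List Int) (n : Int)
    (vals : PySem.Dict (Int × Int) Int) (j : Int) (lvl : List (Int × Int)) (p : Int × Int) :
    (pvProcess md nums n vals j lvl).get? p =
      if p ∈ lvl then some (pvVal md nums n vals j p) else none := by
  unfold pvProcess
  have aux : ∀ (l : List (Int × Int)) (acc : PySem.Dict (Int × Int) Int),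
      (l.foldl (fun new p => new.insert p (pvVal md nums n vals j p)) acc).get? p =
        if p ∈ l then some (pvVal md nums n vals j p) else acc.get? p := by
    intro l
    induction l with
    | nil => intro acc; simp
    | cons a l ih =>
      intro acc
      simp only [List.foldl_cons, ih, PySem.Dict.get?_insert, List.mem_cons]
      by_cases h1 : p ∈ l
      · simp [h1]
      · by_cases h2 : p = a <;> simp [h1, h2]
  rw [aux, PySem.Dict.get?_empty]

theorem pvProcess_good {md : PySem.Dict (Int × Int × Int) Int} {nums : List Int} {n : Int}
    {vals : PySem.Dict (Int × Int) Int} {j : Int} {S : PySem.Set (Int × Int)}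
    (hn : n = (nums.length : Int)) (hjlo : -(nums.length : Int) ≤ j) (hjhi : j ≤ n)
    (Hv : ∀ q ∈ pvExpand md nums n S j, vals.get? q = some (pvG md nums q.1 q.2 (j + 1))) :
    ∀ p ∈ S, (pvProcess md nums n vals j S).get? p = some (pvG md nums p.1 p.2 j) := by
  intro p hp
  rw [pvProcess_get?, if_pos hp]
  congr 1
  unfold pvVal
  rcases hl : pvLeaf md n p.1 p.2 j with _ | v
  · have hjn : j < n := by
      have := (pvLeaf_none_elim hl).2.2
      omega
    obtain ⟨x, hx⟩ := pvGetSome nums j hjlo (by omega)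
    have hmem := pvMem_expand md nums n j S p hp hl
    have e1 := Hv _ hmem.1
    have e2 := Hv _ hmem.2
    rw [PySem.Dict.getD_eq_get?_getD, PySem.Dict.getD_eq_get?_getD, e1, e2]
    simp only [Option.getD_some]
    rcases (pvLeaf_none_elim hl) with ⟨hmd, hnb, hnn⟩
    rw [pvG_rec hmd hnb (by omega) hx]
    rw [hx]
    simp
  · exact (pvLeaf_some_g hn hl).symm

-- the forward loop's result, accumulator split off
def pvChain (md : PySem.Dict (Int × Int × Int) Int) (nums : List Int) (n : Int)
    (S : PySem.Set (Int × Int)) (j : Int) : List (PySem.Set (Int × Int)) :=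
  if _h : j < n then S :: pvChain md nums n (pvExpand md nums n S j) (j + 1) else [S]
termination_by (n - j).toNat
decreasing_by omega

theorem pvChain_eq (md : PySem.Dict (Int × Int × Int) Int) (nums : List Int) (n : Int)
    (S : PySem.Set (Int × Int)) (j : Int) :
    pvChain md nums n S j =
      if j < n then S :: pvChain md nums n (pvExpand md nums n S j) (j + 1) else [S] := by
  rw [pvChain.eq_def]; split <;> rfl

theorem pvFwd_eq_chain (md : PySem.Dict (Int × Int × Int) Int) (nums : List Int) (n : Int)
    (lv : List (PySem.Set (Int × Int))) (S : PySem.Set (Int × Int)) (j : Int) :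
    pvFwd md nums n lv S j = lv ++ pvChain md nums n S j := by
  fun_induction pvFwd md nums n lv S j with
  | case1 lv S j h ih =>
    rw [ih, pvChain_eq md nums n S j, if_pos h]
    simp
  | case2 lv S j h =>
    rw [pvChain_eq md nums n S j, if_neg h]

theorem pvChain_length (md : PySem.Dict (Int × Int × Int) Int) (nums : List Int) (n : Int)
    (S : PySem.Set (Int × Int)) (j : Int) :
    (pvChain md nums n S j).length = (n - j).toNat + 1 := by
  fun_induction pvChain md nums n S j with
  | case1 S j h ih => rw [List.length_cons, ih]; omega
  | case2 S j h => simp; omega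

theorem pvBwd_append (md : PySem.Dict (Int × Int × Int) Int) (nums : List Int) (n : Int)
    (l1 l2 : List (PySem.Set (Int × Int))) (vals : PySem.Dict (Int × Int) Int) (j : Int) :
    pvBwd md nums n vals j (l1 ++ l2) =
      pvBwd md nums n (pvBwd md nums n vals j l1) (j - l1.length) l2 := by
  induction l1 generalizing vals j with
  | nil => simp [pvBwd]
  | cons a l1 ih =>
    simp only [List.cons_append, pvBwd, List.length_cons]
    rw [ih]
    congr 1
    push_cast
    ring

theorem pvBwd_chain (md : PySem.Dict (Int × Int × Int) Int) (nums : List Int) (n : Int)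
    (hn : n = (nums.length : Int)) :
    ∀ (k : Nat) (j : Int) (S : PySem.Set (Int × Int)), (n - j).toNat = k →
      -(nums.length : Int) ≤ j → j ≤ n →
      ∀ p ∈ S, (pvBwd md nums n PySem.Dict.empty n ((pvChain md nums n S j).reverse)).get? p =
        some (pvG md nums p.1 p.2 j) := by
  intro k
  induction k using Nat.strong_induction_on with
  | _ k IH =>
    intro j S hk hlo hhi p hp
    by_cases hj : j < n
    · rw [pvChain_eq md nums n S j, if_pos hj, List.reverse_cons, pvBwd_append]
      have hlen : (((pvChain md nums n (pvExpand md nums n S j) (j + 1)).reverse).length : Int) = (n - (j + 1)).toNat + 1 := by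
        rw [List.length_reverse, pvChain_length]; push_cast; ring
      have hj' : (n : Int) - (((pvChain md nums n (pvExpand md nums n S j) (j + 1)).reverse).length : Int) = j := by
        rw [hlen]; omega
      rw [hj']
      show (pvProcess md nums n
        (pvBwd md nums n PySem.Dict.empty n ((pvChain md nums n (pvExpand md nums n S j) (j + 1)).reverse))
        j S).get? p = some (pvG md nums p.1 p.2 j)
      refine pvProcess_good hn hlo hhi ?_ p hp
      intro q hq
      exact IH ((n - (j + 1)).toNat) (by omega) (j + 1) (pvExpand md nums n S j) rfl (by omega)
        (by omega) q hq
    · have hje : j = n := by omega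
      subst hje
      rw [pvChain_eq md nums j S j, if_neg hj]
      show (pvProcess md nums j PySem.Dict.empty j S).get? p = some (pvG md nums p.1 p.2 j)
      refine pvProcess_good hn hlo le_rfl ?_ p hp
      intro q hq
      exact absurd hq (fun h => pvExpand_at_n md nums j S q h)

theorem pvMemoDict_mem (l : List (Int × Int × Int × Int)) (k : Int × Int × Int)
    (h : ∃ e ∈ l, (e.1, e.2.1, e.2.2.1) = k) : (pvMemoDict (some l)).get? k ≠ none := by
  have aux : ∀ (l : List (Int × Int × Int × Int)) (d : PySem.Dict (Int × Int × Int) Int),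
      (d.get? k ≠ none ∨ ∃ e ∈ l, (e.1, e.2.1, e.2.2.1) = k) →
      (l.foldl (fun d e => d.insert (e.1, e.2.1, e.2.2.1) e.2.2.2) d).get? k ≠ none := by
    intro l
    induction l with
    | nil =>
      intro d h
      rcases h with h | ⟨e, he, _⟩
      · exact h
      · cases he
    | cons a l ih =>
      intro d h
      simp only [List.foldl_cons]
      apply ih
      by_cases hk : k = (a.1, a.2.1, a.2.2.1)
      · left
        rw [PySem.Dict.get?_insert, if_pos hk]
        simp
      · rcases h with h | ⟨e, he, hkey⟩
        · left
          rw [PySem.Dict.get?_insert, if_neg hk]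
          exact h
        · rcases List.mem_cons.mp he with rfl | he'
          · exact absurd hkey.symm hk
          · exact Or.inr ⟨e, he', hkey⟩
  unfold pvMemoDict
  exact aux l PySem.Dict.empty (Or.inr h)

theorem pvB_eq_g (total component_count : Int) (nums : List Int)
    (memo : Option (List (Int × Int × Int × Int))) (i : Int)
    (hPre : Pre_total_combination total component_count nums memo i) :
    total_combination_alt total component_count nums memo i =
      pvG (pvMemoDict memo) nums total component_count i := by
  have hmemo : pvMemoDict memo = pvMemoDict (some (memo.getD [])) := by cases memo <;> rfl
  unfold total_combination_alt
  dsimp only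
  split
  · rename_i v hv
    exact (pvG_memo hv).symm
  · rename_i hv
    split_ifs with hb h0
    · exact (pvG_base1 hv hb).symm
    · by_cases hlt : total < 0 ∨ component_count < 0
      · exact (pvG_base0 hv hb (by tauto)).symm
      · have hni : (nums.length : Int) ≤ i := by tauto
        by_cases hin : i = (nums.length : Int)
        · exact (pvG_base0 hv hb (by tauto)).symm
        · exact (pvG_zero_of_ge hv hb (by tauto) (by omega)).symm
    · have hin : i < (nums.length : Int) := by
        rcases not_or.mp h0 with ⟨-, h0'⟩
        rcases not_or.mp h0' with ⟨-, h0''⟩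
        omega
      have hlo : -(nums.length : Int) ≤ i := by
        rcases hPre with h | h | h | h | h
        · exact h.1
        · exact absurd (Or.inl h) h0
        · exact absurd (Or.inr (Or.inl h)) h0
        · exact absurd h hb
        · exfalso
          apply pvMemoDict_mem (memo.getD []) (total, component_count, i) h
          rw [← hmemo]
          exact hv
      rw [pvFwd_eq_chain, List.nil_append]
      have hmem : (total, component_count) ∈ PySem.Set.add PySem.Set.empty (total, component_count) :=
        (PySem.Set.mem_add _ _ _).mpr (Or.inr rfl)
      have hmain := pvBwd_chain (pvMemoDict memo) nums (nums.length : Int) rfl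
        (((nums.length : Int) - i).toNat) i (PySem.Set.add PySem.Set.empty (total, component_count))
        rfl hlo (by omega) (total, component_count) hmem
      rw [PySem.Dict.getD_eq_get?_getD, hmain]
      rfl

-- ===== VERDICT (by name: the statement is the Claim_ definition above) =====
theorem total_combination_spec : Claim_equal_total_combination := by
  intro total component_count nums memo i _hDom hPre
  unfold Spec_total_combination
  rw [pvA_eq_g, pvB_eq_g total component_count nums memo i hPre]
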